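-- pv_equiv track=rewrite | github.com/Zoxso/FluidAudio | mobius/tools/coreml-cli/src/coreml_cli/output.py | _wrap_items
-- ===== SOURCE A (Python) =====
-- def _wrap_items(label: str, items: list[str], width: int) -> str:
--     """Wrap comma-separated items with aligned continuation lines."""
--     prefix = f"  {label} "
--     indent = " " * len(prefix)
--
--     lines: list[str] = []
--     current = prefix
--     for i, item in enumerate(items):
--         addition = f", {item}" if i > 0 else item
--         if i > 0 and len(current) + len(addition) > width:
--             lines.append(current + ",")
--             current = indent + item
--         else:
--             current += addition
--     lines.append(current)
--     return "\n".join(lines)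
-- ===== SOURCE B (Python) =====
-- def _wrap_items(label: str, items: list[str], width: int) -> str:
--     """Wrap comma-separated items with aligned continuation lines."""
--     prefix = f"  {label} "
--     pad = len(prefix)
--
--     # Pass 1: prefix-sum the geometry: spans[i] = (start, end) offset of item i
--     # in the fully joined text "prefix + ', '.join(items)".
--     spans = []
--     off = pad
--     for it in items:
--         spans.append((off, off + len(it)))
--         off += len(it) + 2
--
--     # Pass 2: purely arithmetic scan for the indices where a new line starts:
--     # item i opens a new line iff pad + end(i) - start(first item on its line) > width.
--     cuts = []
--     line_start = pad
--     for i, (st, en) in enumerate(spans):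
--         if i > 0 and pad + en - line_start > width:
--             cuts.append(i)
--             line_start = st
--
--     # Pass 3: render each index range [bounds[k], bounds[k+1]) as one line.
--     bounds = [0] + cuts + [len(items)]
--     lines = []
--     for k, (lo, hi) in enumerate(zip(bounds, bounds[1:])):
--         head = prefix if k == 0 else " " * pad
--         tail = "," if hi != len(items) else ""
--         lines.append(head + ", ".join(items[lo:hi]) + tail)
--     return "\n".join(lines)
-- ===== Notes on version B (the rewrite author's own statement) =====
-- stated objective: alternative
-- what changed: A makes one pass that grows each output line by string concatenation, testing the current line's length; B separates geometry from text: it prefix-sums item offsets into spans, scans those integers alone to find the cut indices (break before item i iff pad + end(i) - line_start > width), and only then renders each index range [lo,hi) as a line.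
import Mathlib
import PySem

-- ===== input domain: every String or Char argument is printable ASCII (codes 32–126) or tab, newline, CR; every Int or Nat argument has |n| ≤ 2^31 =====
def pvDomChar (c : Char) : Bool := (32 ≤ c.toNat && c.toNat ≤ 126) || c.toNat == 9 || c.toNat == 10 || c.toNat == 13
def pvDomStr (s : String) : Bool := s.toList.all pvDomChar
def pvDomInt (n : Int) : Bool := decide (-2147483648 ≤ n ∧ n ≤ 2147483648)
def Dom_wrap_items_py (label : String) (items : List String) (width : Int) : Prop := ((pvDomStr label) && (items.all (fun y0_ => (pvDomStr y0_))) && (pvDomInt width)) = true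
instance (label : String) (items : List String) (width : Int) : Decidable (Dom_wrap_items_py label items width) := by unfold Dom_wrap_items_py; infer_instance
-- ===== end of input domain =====

-- A grows each line by string concatenation in one pass; B separates geometry from text:
-- it prefix-sums item offsets, finds the cut indices by integer arithmetic alone, and only
-- then renders each index range as a line (objective: alternative decomposition).
-- Proved: the two return equal strings on all inputs in the domain.

-- ===== PORT A =====
-- the `for i, item in enumerate(items)` loop of A, carrying the index i and (lines, current)
def pvALoop (indent : List Char) (width : Int) :
    List String → Nat → List (List Char) × List Char → List (List Char) × List Char
  | [], _, st => st
  | item :: rest, i, (lines, current) =>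
    let addition : List Char := if i > 0 then ',' :: ' ' :: item.toList else item.toList
    if i > 0 ∧ ((current.length : Int) + addition.length > width) then
      pvALoop indent width rest (i + 1) (lines ++ [current ++ [',']], indent ++ item.toList)
    else
      pvALoop indent width rest (i + 1) (lines, current ++ addition)

def wrap_items_py (label : String) (items : List String) (width : Int) : String :=
  let pfx : List Char := [' ', ' '] ++ label.toList ++ [' ']
  let indent : List Char := List.replicate pfx.length ' '
  let st := pvALoop indent width items 0 ([], pfx)
  String.mk (PySem.Chars.join ['\n'] (st.1 ++ [st.2]))

-- ===== PORT B =====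
-- pass 1 of B: spans[i] = (start, end) offset of item i in "prefix + ', '.join(items)"
def pvSpans (off : Int) : List String → List (Int × Int)
  | [] => []
  | it :: rest => (off, off + it.toList.length) :: pvSpans (off + it.toList.length + 2) rest

-- pass 2 of B: the `for i, (st, en) in enumerate(spans)` scan, carrying (cuts, line_start)
def pvCuts (pad width : Int) : List (Int × Int) → Nat → List Nat × Int → List Nat × Int
  | [], _, st => st
  | (stt, en) :: rest, i, (cuts, ls) =>
    if i > 0 ∧ pad + en - ls > width then
      pvCuts pad width rest (i + 1) (cuts ++ [i], stt)
    else
      pvCuts pad width rest (i + 1) (cuts, ls)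

-- pass 3 of B: the line rendered for one bounds pair (lo, hi) at position k
def pvLine (pfx : List Char) (items : List String) (k : Int) (lo hi : Nat) : List Char :=
  (if k == 0 then pfx else List.replicate pfx.length ' ') ++
    PySem.Chars.join [',', ' ']
      ((PySem.List.slice items (some (lo : Int)) (some (hi : Int))).map String.toList) ++
    (if hi ≠ items.length then [','] else [])

def wrap_items_py_alt (label : String) (items : List String) (width : Int) : String :=
  let pfx : List Char := [' ', ' '] ++ label.toList ++ [' ']
  let pad := pfx.length
  let spans := pvSpans (pad : Int) items
  let cuts := (pvCuts (pad : Int) width spans 0 ([], (pad : Int))).1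
  let bounds : List Nat := 0 :: (cuts ++ [items.length])
  let lines := (PySem.List.enumerate (bounds.zip bounds.tail) 0).map
    (fun p => pvLine pfx items p.1 p.2.1 p.2.2)
  String.mk (PySem.Chars.join ['\n'] lines)

-- ===== PRECONDITION & SPEC =====
def Spec_wrap_items_py (label : String) (items : List String) (width : Int) (out : String) : Prop := out = wrap_items_py_alt label items width
instance (label : String) (items : List String) (width : Int) (out : String) : Decidable (Spec_wrap_items_py label items width out) := by unfold Spec_wrap_items_py; infer_instance

-- ===== CLAIM (what is proved, stated in full; the proofs are below) =====
def Claim_equal_wrap_items_py : Prop := ∀ (label : String) (items : List String) (width : Int), Dom_wrap_items_py label items width → Spec_wrap_items_py label items width (wrap_items_py label items width)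

-- ===== LEMMAS AND PROOFS =====

-- proof-only middle form: A's groups of items per line, built by the obvious grouping loop
def pvBLoop (pad : Nat) (width : Int) :
    List String → List (List (List Char)) × List (List Char) × Int →
      List (List (List Char)) × List (List Char) × Int
  | [], st => st
  | item :: rest, (groups, cur, curLen) =>
    if curLen + 2 + (item.toList.length : Int) > width then
      pvBLoop pad width rest (groups ++ [cur], [item.toList], (pad : Int) + item.toList.length)
    else
      pvBLoop pad width rest (groups, cur ++ [item.toList], curLen + 2 + item.toList.length)

-- rendering of one group of items, joined by ", "
def pvRend (g : List (List Char)) : List Char := PySem.Chars.join [',', ' '] g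

def pvGroupWrap (label : String) (items : List String) (width : Int) : String :=
  let pfx : List Char := [' ', ' '] ++ label.toList ++ [' ']
  match items with
  | [] => String.mk pfx
  | first :: rest =>
    let pad := pfx.length
    let st := pvBLoop pad width rest ([], [first.toList], (pad : Int) + first.toList.length)
    let groups := st.1 ++ [st.2.1]
    match groups with
    | [] => String.mk pfx
    | g0 :: gs =>
      let rendered := (pfx ++ pvRend g0) ::
        gs.map (fun g => List.replicate pad ' ' ++ pvRend g)
      String.mk (PySem.Chars.join [',', '\n'] rendered)

-- A's `lines` as a function of the closed groups
def pvLinesOf (pfx ind : List Char) : List (List (List Char)) → List (List Char)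
  | [] => []
  | g :: gs => (pfx ++ pvRend g ++ [',']) :: gs.map (fun h => ind ++ pvRend h ++ [','])

-- A's `current` as a function of the open group
def pvCurOf (pfx ind : List Char) (groups : List (List (List Char))) (cur : List (List Char)) : List Char :=
  (if groups = [] then pfx else ind) ++ pvRend cur

theorem pvRend_snoc (g : List (List Char)) (x : List Char) (h : g ≠ []) :
    pvRend (g ++ [x]) = pvRend g ++ [','] ++ [' '] ++ x := by
  induction g with
  | nil => exact absurd rfl h
  | cons a t ih =>
    cases t with
    | nil => simp [pvRend, PySem.Chars.join_cons_cons, PySem.Chars.join_singleton]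
    | cons b t' =>
      simp only [List.cons_append, pvRend, PySem.Chars.join_cons_cons] at *
      simp [ih (by simp)]

theorem pvLinesOf_snoc (pfx ind : List Char) (groups : List (List (List Char))) (cur : List (List Char)) :
    pvLinesOf pfx ind (groups ++ [cur]) =
      pvLinesOf pfx ind groups ++ [pvCurOf pfx ind groups cur ++ [',']] := by
  cases groups with
  | nil => simp [pvLinesOf, pvCurOf]
  | cons g gs => simp [pvLinesOf, pvCurOf]

-- core invariant: A's loop on the tail equals the rendering of the grouping loop's state
theorem pvLoop_rel (pfx : List Char) (width : Int) (rest : List String) :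
    ∀ (i : Nat) (groups : List (List (List Char))) (cur : List (List Char)) (curLen : Int),
      0 < i → cur ≠ [] → curLen = (pfx.length : Int) + (pvRend cur).length →
      pvALoop (List.replicate pfx.length ' ') width rest i
          (pvLinesOf pfx (List.replicate pfx.length ' ') groups,
           pvCurOf pfx (List.replicate pfx.length ' ') groups cur)
        = (pvLinesOf pfx (List.replicate pfx.length ' ')
             (pvBLoop pfx.length width rest (groups, cur, curLen)).1,
           pvCurOf pfx (List.replicate pfx.length ' ')
             (pvBLoop pfx.length width rest (groups, cur, curLen)).1
             (pvBLoop pfx.length width rest (groups, cur, curLen)).2.1) := by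
  induction rest with
  | nil => intro i groups cur curLen _ _ _; simp [pvALoop, pvBLoop]
  | cons item rs ih =>
    intro i groups cur curLen hi hcur hlen
    have hcurlen : ((pvCurOf pfx (List.replicate pfx.length ' ') groups cur).length : Int)
        = curLen := by
      simp [pvCurOf, hlen]; split <;> simp
    simp only [pvALoop, pvBLoop]
    have hip : i > 0 := hi
    by_cases hc : curLen + 2 + (item.toList.length : Int) > width
    · have : (i > 0 ∧ ((pvCurOf pfx (List.replicate pfx.length ' ') groups cur).length : Int)
          + (if i > 0 then ',' :: ' ' :: item.toList else item.toList).length > width) := by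
        refine ⟨hip, ?_⟩
        simp only [if_pos hip, List.length_cons]
        rw [hcurlen]; push_cast; omega
      rw [if_pos this, if_pos hc]
      have hA : pvLinesOf pfx (List.replicate pfx.length ' ') groups
            ++ [pvCurOf pfx (List.replicate pfx.length ' ') groups cur ++ [',']]
          = pvLinesOf pfx (List.replicate pfx.length ' ') (groups ++ [cur]) :=
        (pvLinesOf_snoc _ _ _ _).symm
      have hB : List.replicate pfx.length ' ' ++ item.toList
          = pvCurOf pfx (List.replicate pfx.length ' ') (groups ++ [cur]) [item.toList] := by
        simp [pvCurOf, pvRend, PySem.Chars.join_singleton]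
      rw [hA, hB]
      exact ih (i + 1) (groups ++ [cur]) [item.toList] _ (by omega) (by simp)
        (by simp [pvRend, PySem.Chars.join_singleton])
    · have : ¬ (i > 0 ∧ ((pvCurOf pfx (List.replicate pfx.length ' ') groups cur).length : Int)
          + (if i > 0 then ',' :: ' ' :: item.toList else item.toList).length > width) := by
        intro ⟨_, h⟩
        simp only [if_pos hip, List.length_cons] at h
        rw [hcurlen] at h; push_cast at h; omega
      rw [if_neg this, if_neg hc]
      have hB : pvCurOf pfx (List.replicate pfx.length ' ') groups cur
            ++ (if i > 0 then ',' :: ' ' :: item.toList else item.toList)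
          = pvCurOf pfx (List.replicate pfx.length ' ') groups (cur ++ [item.toList]) := by
        simp only [if_pos hip, pvCurOf, pvRend_snoc cur item.toList hcur]
        simp [pvRend]
      rw [hB]
      exact ih (i + 1) groups (cur ++ [item.toList]) _ (by omega) (by simp)
        (by rw [pvRend_snoc cur item.toList hcur]; simp [hlen]; ring)

-- the final join: A's "\n"-join of comma-terminated lines is a ",\n"-join
theorem pvJoin_comma (xs : List (List Char)) (last : List Char) :
    PySem.Chars.join ['\n'] (xs.map (fun l => l ++ [',']) ++ [last])
      = PySem.Chars.join [',', '\n'] (xs ++ [last]) := by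
  induction xs with
  | nil => simp [PySem.Chars.join_singleton]
  | cons a t ih =>
    cases t with
    | nil => simp [PySem.Chars.join_cons_cons, PySem.Chars.join_singleton]
    | cons b t' =>
      simp only [List.map_cons, List.cons_append, PySem.Chars.join_cons_cons]
      simp only [List.map_cons, List.cons_append] at ih
      rw [ih]; simp

-- lines++[current] in A has exactly the shape pvJoin_comma expects
theorem pvFinal_eq (pfx ind : List Char) (groups : List (List (List Char))) (cur : List (List Char)) :
    PySem.Chars.join ['\n']
        (pvLinesOf pfx ind groups ++ [pvCurOf pfx ind groups cur])
      = PySem.Chars.join [',', '\n']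
          (match groups ++ [cur] with
           | [] => [pfx]
           | g0 :: gs => (pfx ++ pvRend g0) :: gs.map (fun g => ind ++ pvRend g)) := by
  cases groups with
  | nil => simp [pvLinesOf, pvCurOf, PySem.Chars.join_singleton]
  | cons g gs =>
    simp only [pvLinesOf, pvCurOf, List.cons_append]
    have := pvJoin_comma ((pfx ++ pvRend g) :: gs.map (fun h => ind ++ pvRend h)) (ind ++ pvRend cur)
    simp only [List.map_cons, List.map_map, List.cons_append] at this ⊢
    rw [show (fun h => ind ++ pvRend h ++ [',']) = (fun l => l ++ [',']) ∘ (fun h => ind ++ pvRend h) by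
          funext h; simp, ← List.map_map, List.append_assoc] at *
    simpa [List.map_append] using this

-- stage 1: A equals the grouping middle form
theorem pvA_eq_group (label : String) (items : List String) (width : Int) :
    wrap_items_py label items width = pvGroupWrap label items width := by
  unfold wrap_items_py pvGroupWrap
  cases items with
  | nil => simp [pvALoop, PySem.Chars.join_singleton]
  | cons first rest =>
    simp only [pvALoop, gt_iff_lt, lt_self_iff_false, false_and, if_false]
    set pfx : List Char := [' ', ' '] ++ label.toList ++ [' '] with hpfx
    have h0p : (([] : List (List Char)), pfx ++ first.toList)
        = (pvLinesOf pfx (List.replicate pfx.length ' ') [],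
           pvCurOf pfx (List.replicate pfx.length ' ') [] [first.toList]) := by
      simp [pvLinesOf, pvCurOf, pvRend, PySem.Chars.join_singleton]
    rw [h0p,
      pvLoop_rel pfx width rest 1 [] [first.toList]
        ((pfx.length : Int) + first.toList.length) (by omega) (by simp)
        (by simp [pvRend, PySem.Chars.join_singleton]),
      pvFinal_eq]
    cases hg : (pvBLoop pfx.length width rest ([], [first.toList],
        (pfx.length : Int) + first.toList.length)).1 ++
        [(pvBLoop pfx.length width rest ([], [first.toList],
          (pfx.length : Int) + first.toList.length)).2.1] with
    | nil => simp at hg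
    | cons g0 gs => simp [pvRend]

-- ---------- stage 2: the grouping middle form equals B ----------

-- partial sums of the group sizes = the cut indices
def pvPsums : List Nat → Nat → List Nat
  | [], _ => []
  | a :: t, acc => (acc + a) :: pvPsums t (acc + a)

theorem pvPsums_snoc (l : List Nat) (a : Nat) :
    ∀ acc, pvPsums (l ++ [a]) acc = pvPsums l acc ++ [acc + l.sum + a] := by
  induction l with
  | nil => intro acc; simp [pvPsums]
  | cons b t ih => intro acc; simp [pvPsums, ih]; ring_nf

-- append "," to every line but the last
def pvTag : List (List Char) → List (List Char)
  | [] => []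
  | [x] => [x]
  | x :: y :: t => (x ++ [',']) :: pvTag (y :: t)

theorem pvTag_cons_cons (x : List Char) (L : List (List Char)) (h : L ≠ []) :
    pvTag (x :: L) = (x ++ [',']) :: pvTag L := by
  cases L with
  | nil => exact absurd rfl h
  | cons y ys => rfl

theorem pvTag_join (L : List (List Char)) (h : L ≠ []) :
    PySem.Chars.join ['\n'] (pvTag L) = PySem.Chars.join [',', '\n'] L := by
  induction L with
  | nil => exact absurd rfl h
  | cons a t ih =>
    cases t with
    | nil => simp [pvTag, PySem.Chars.join_singleton]
    | cons b t' =>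
      have hcons : ∃ y ys, pvTag (b :: t') = y :: ys := by
        cases t' <;> exact ⟨_, _, rfl⟩
      obtain ⟨y, ys, hy⟩ := hcons
      show PySem.Chars.join ['\n'] ((a ++ [',']) :: pvTag (b :: t')) = _
      rw [hy, PySem.Chars.join_cons_cons, ← hy, ih (by simp), PySem.Chars.join_cons_cons]
      simp

-- the cuts scan mirrors the grouping loop: cuts = partial sums of closed-group sizes
theorem pvCuts_eq_psums (pad : Nat) (width : Int) :
    ∀ (rest : List String) (i : Nat) (off ls curLen : Int)
      (G : List (List (List Char))) (cur : List (List Char)) (cuts : List Nat),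
      0 < i →
      i = (G.map List.length).sum + cur.length →
      cuts = pvPsums (G.map List.length) 0 →
      curLen = (pad : Int) + off - 2 - ls →
      (pvCuts (pad : Int) width (pvSpans off rest) i (cuts, ls)).1
        = pvPsums ((pvBLoop pad width rest (G, cur, curLen)).1.map List.length) 0 := by
  intro rest
  induction rest with
  | nil => intro i off ls curLen G cur cuts _ _ hcuts _; simp [pvSpans, pvCuts, pvBLoop, hcuts]
  | cons item rs ih =>
    intro i off ls curLen G cur cuts hi hsum hcuts hlen
    simp only [pvSpans, pvCuts, pvBLoop]
    by_cases hc : curLen + 2 + (item.toList.length : Int) > width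
    · have hc' : i > 0 ∧ (pad : Int) + (off + (item.toList.length : Int)) - ls > width := by
        constructor; · exact hi
        · omega
      rw [if_pos hc', if_pos hc]
      have hcuts' : cuts ++ [i] = pvPsums ((G ++ [cur]).map List.length) 0 := by
        rw [List.map_append]
        simp only [List.map_cons, List.map_nil]
        rw [pvPsums_snoc]
        simp [hcuts, hsum]
      have := ih (i + 1) (off + (item.toList.length : Int) + 2) off
        ((pad : Int) + item.toList.length) (G ++ [cur]) [item.toList] (cuts ++ [i])
        (by omega) (by simp [hsum]) hcuts' (by ring)
      simpa using this
    · have hc' : ¬ (i > 0 ∧ (pad : Int) + (off + (item.toList.length : Int)) - ls > width) := by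
        intro ⟨_, h⟩; omega
      rw [if_neg hc', if_neg hc]
      have := ih (i + 1) (off + (item.toList.length : Int) + 2) ls
        (curLen + 2 + item.toList.length) G (cur ++ [item.toList]) cuts
        (by omega) (by simp [hsum]; ring) hcuts (by omega)
      simpa using this

-- the grouping loop's groups are nonempty and concatenate to the consumed items
theorem pvBLoop_inv (pad : Nat) (width : Int) :
    ∀ (rest : List String) (G : List (List (List Char))) (cur : List (List Char))
      (curLen : Int) (pre : List String),
      (∀ g ∈ G, g ≠ []) → cur ≠ [] → G.flatten ++ cur = pre.map String.toList →
      (∀ g ∈ (pvBLoop pad width rest (G, cur, curLen)).1 ++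
          [(pvBLoop pad width rest (G, cur, curLen)).2.1], g ≠ []) ∧
      ((pvBLoop pad width rest (G, cur, curLen)).1.flatten ++
          (pvBLoop pad width rest (G, cur, curLen)).2.1 = (pre ++ rest).map String.toList) := by
  intro rest
  induction rest with
  | nil =>
    intro G cur curLen pre hG hcur hflat
    simp only [pvBLoop, List.append_nil]
    refine ⟨?_, hflat⟩
    intro g hg
    rcases List.mem_append.1 hg with h | h
    · exact hG g h
    · simp at h; subst h; exact hcur
  | cons item rs ih =>
    intro G cur curLen pre hG hcur hflat
    simp only [pvBLoop]
    by_cases hc : curLen + 2 + (item.toList.length : Int) > width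
    · rw [if_pos hc]
      have := ih (G ++ [cur]) [item.toList] ((pad : Int) + item.toList.length)
        (pre ++ [item])
        (by intro g hg; rcases List.mem_append.1 hg with h | h
            · exact hG g h
            · simp at h; subst h; exact hcur)
        (by simp)
        (by simp [← hflat])
      simpa using this
    · rw [if_neg hc]
      have := ih G (cur ++ [item.toList]) (curLen + 2 + item.toList.length)
        (pre ++ [item]) hG (by simp)
        (by simp [← hflat])
      simpa using this

-- enumerate from a positive start: every index is nonzero, so every head is the indent
theorem pvEnum_map (pfx : List Char) (items : List String) :
    ∀ (ps : List (Nat × Nat)) (s : Int), 1 ≤ s →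
      (PySem.List.enumerate ps s).map (fun p => pvLine pfx items p.1 p.2.1 p.2.2)
        = ps.map (fun q => pvLine pfx items 1 q.1 q.2) := by
  intro ps
  induction ps with
  | nil => intro s _; simp
  | cons q t ih =>
    intro s hs
    rw [PySem.List.enumerate_cons]
    simp only [List.map_cons]
    rw [ih (s + 1) (by omega)]
    have h1 : pvLine pfx items s q.1 q.2 = pvLine pfx items 1 q.1 q.2 := by
      unfold pvLine
      have : (s == (0 : Int)) = false := by simp; omega
      rw [this]; rfl
    rw [h1]

-- continuation lines: the bounds pairs of the remaining groups render to the tagged lines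
theorem pvCont (pfx : List Char) :
    ∀ (gs : List (List (List Char))) (pre suf : List String),
      gs ≠ [] → (∀ g ∈ gs, g ≠ []) → gs.flatten = suf.map String.toList →
      ((pre.length :: (pvPsums (gs.dropLast.map List.length) pre.length ++ [(pre ++ suf).length])).zip
          (pvPsums (gs.dropLast.map List.length) pre.length ++ [(pre ++ suf).length])).map
        (fun q => pvLine pfx (pre ++ suf) 1 q.1 q.2)
        = pvTag (gs.map (fun g => List.replicate pfx.length ' ' ++ pvRend g)) := by
  intro gs
  induction gs with
  | nil => intro pre suf h; exact absurd rfl h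
  | cons g t ih =>
    intro pre suf _ hall hflat
    cases t with
    | nil =>
      -- single remaining group: one pair (pre.length, n), no trailing comma
      have hsuf : suf.map String.toList = g := by simpa using hflat.symm
      simp only [List.dropLast, List.map_nil, pvPsums, List.nil_append, List.map_cons, pvTag]
      simp only [List.zip_cons_cons, List.zip_nil_right, List.map_cons, List.map_nil]
      unfold pvLine
      have hsl : PySem.List.slice (pre ++ suf) (some ((pre.length : Nat) : Int))
          (some (((pre ++ suf).length : Nat) : Int)) = suf := by
        rw [PySem.List.slice_natCast]
        simp
      rw [hsl]
      simp [hsuf, pvRend]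
    | cons g' t' =>
      -- first remaining group g, then at least one more
      have hg' : g' ≠ [] := hall g' (by simp)
      have hflat' : (suf.map String.toList) = g ++ (g' :: t').flatten := by
        simpa using hflat.symm
      have hglen : g.length ≤ suf.length := by
        have := congrArg List.length hflat'
        simp at this; omega
      have hlt : pre.length + g.length < (pre ++ suf).length := by
        have := congrArg List.length hflat'
        have hg'l : 0 < g'.length := List.length_pos_iff.2 hg'
        simp at this ⊢
        omega
      have hdl : (g :: g' :: t').dropLast = g :: (g' :: t').dropLast := by
        simp [List.dropLast]
      rw [hdl]
      simp only [List.map_cons, pvPsums, List.cons_append, List.zip_cons_cons, List.map_cons]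
      -- head line: slice [pre.length, pre.length + g.length), with a comma
      have hhead : pvLine pfx (pre ++ suf) 1 pre.length (pre.length + g.length)
          = List.replicate pfx.length ' ' ++ pvRend g ++ [','] := by
        unfold pvLine
        have hsl : PySem.List.slice (pre ++ suf) (some ((pre.length : Nat) : Int))
            (some (((pre.length + g.length : Nat)) : Int)) = suf.take g.length := by
          rw [PySem.List.slice_natCast]
          simp
        rw [hsl]
        have htake : (suf.take g.length).map String.toList = g := by
          rw [List.map_take, hflat', List.take_left]
        rw [htake]
        have hgs : g.length ≠ suf.length := by
          have h1 := congrArg List.length hflat'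
          have hg1l : 0 < g'.length := List.length_pos_iff.2 hg'
          simp at h1 ⊢
          omega
        simp [pvRend, hgs]
      rw [hhead]
      -- tail lines: recurse with pre' = pre ++ suf.take g.length
      have hpre' : (pre ++ suf.take g.length).length = pre.length + g.length := by
        simp [min_eq_left hglen]
      have hitems : (pre ++ suf.take g.length) ++ suf.drop g.length = pre ++ suf := by
        simp
      have hflat'' : (g' :: t').flatten = (suf.drop g.length).map String.toList := by
        rw [List.map_drop, hflat', List.drop_left]
      have := ih (pre ++ suf.take g.length) (suf.drop g.length) (by simp)
        (by intro x hx; exact hall x (by simp [hx])) hflat''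
      rw [hpre', hitems] at this
      rw [this, pvTag_cons_cons _ _ (by simp)]
      simp

-- stage 2 main lemma
theorem pvGroup_eq_alt (label : String) (items : List String) (width : Int) :
    pvGroupWrap label items width = wrap_items_py_alt label items width := by
  unfold pvGroupWrap wrap_items_py_alt
  cases items with
  | nil =>
    have h1 : ∀ pfx : List Char, pvLine pfx [] 0 0 0 = pfx := by
      intro pfx
      unfold pvLine
      simp [PySem.List.slice, PySem.Chars.join_nil]
    simp [pvSpans, pvCuts, h1, PySem.List.enumerate_cons, PySem.List.enumerate_nil,
      PySem.Chars.join_singleton]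
  | cons first rest =>
    dsimp only
    set pfx : List Char := [' ', ' '] ++ label.toList ++ [' '] with hpfx
    set pad : Nat := pfx.length with hpad
    -- the cuts scan: first step (i = 0) never breaks
    have hstep : pvCuts (pad : Int) width (pvSpans (pad : Int) (first :: rest)) 0 ([], (pad : Int))
        = pvCuts (pad : Int) width (pvSpans ((pad : Int) + first.toList.length + 2) rest) 1
            ([], (pad : Int)) := by
      simp [pvSpans, pvCuts]
    have hcuts : (pvCuts (pad : Int) width (pvSpans (pad : Int) (first :: rest)) 0 ([], (pad : Int))).1
        = pvPsums ((pvBLoop pad width rest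
            ([], [first.toList], (pad : Int) + first.toList.length)).1.map List.length) 0 := by
      rw [hstep]
      exact pvCuts_eq_psums pad width rest 1 ((pad : Int) + first.toList.length + 2) (pad : Int)
        ((pad : Int) + first.toList.length) [] [first.toList] [] (by omega) (by simp)
        (by simp [pvPsums]) (by ring)
    have hinv := pvBLoop_inv pad width rest [] [first.toList]
      ((pad : Int) + first.toList.length) [first] (by simp) (by simp) (by simp)
    set st := pvBLoop pad width rest ([], [first.toList], (pad : Int) + first.toList.length) with hst
    obtain ⟨hall, hflat⟩ := hinv
    have hflat2 : (st.1 ++ [st.2.1]).flatten = (first :: rest).map String.toList := by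
      simpa using hflat
    have hdl : st.1 = (st.1 ++ [st.2.1]).dropLast := by simp
    -- rewrite the bounds via the groups
    rw [hcuts]
    cases hGs : st.1 ++ [st.2.1] with
    | nil => simp at hGs
    | cons g0 gs =>
      have hflat0 : (g0 :: gs).flatten = (first :: rest).map String.toList := by
        rw [← hGs]; exact hflat2
      have hall0 : ∀ g ∈ g0 :: gs, g ≠ [] := by rw [← hGs]; exact hall
      have hdrop : st.1.map List.length = ((g0 :: gs).dropLast).map List.length := by
        rw [hdl, hGs]
      rw [hdrop]
      cases gs with
      | nil =>
        -- one line, no cuts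
        have hsuf : (first :: rest).map String.toList = g0 := by simpa using hflat0.symm
        simp only [List.dropLast, List.map_nil, pvPsums, List.nil_append]
        simp only [List.zip_cons_cons, List.zip_nil_right,
          List.tail_cons, PySem.List.enumerate_cons, PySem.List.enumerate_nil,
          List.map_cons, List.map_nil]
        unfold pvLine
        have hsl : PySem.List.slice (first :: rest) (some ((0 : Nat) : Int))
            (some ((((first :: rest).length : Nat)) : Int)) = first :: rest := by
          rw [PySem.List.slice_natCast]; simp
        have h00 : ((0 : Int) == (0 : Int)) = true := by decide
        simp only [Nat.cast_zero] at hsl ⊢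
        rw [hsl]
        simp [hsuf, PySem.Chars.join_singleton, pvRend]
      | cons g1 t =>
        -- first line with comma, then the continuation lines
        have hdl2 : (g0 :: g1 :: t).dropLast = g0 :: (g1 :: t).dropLast := by
          simp [List.dropLast]
        rw [hdl2]
        simp only [List.map_cons, pvPsums, Nat.zero_add, List.cons_append, List.zip_cons_cons,
          List.tail_cons, PySem.List.enumerate_cons, List.map_cons]
        -- head line
        have hg1 : g1 ≠ [] := hall0 g1 (by simp)
        have hflat1 : ((first :: rest).map String.toList) = g0 ++ (g1 :: t).flatten := by
          simpa using hflat0.symm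
        have hg1l : 0 < g1.length := List.length_pos_iff.2 hg1
        have h2 : rest.length + 1 = g0.length + (g1 :: t).flatten.length := by
          have := congrArg List.length hflat1
          simpa using this
        have h3 : 0 < (g1 :: t).flatten.length := by
          rw [List.flatten_cons, List.length_append]
          omega
        have hg0len : g0.length ≤ (first :: rest).length := by
          simp only [List.length_cons]
          omega
        have hhead : pvLine pfx (first :: rest) 0 0 g0.length
            = pfx ++ pvRend g0 ++ [','] := by
          unfold pvLine
          have htake : ((first :: rest).take g0.length).map String.toList = g0 := by
            rw [List.map_take, hflat1, List.take_left]
          have hne : ¬ g0.length = rest.length + 1 := by omega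
          simp [PySem.List.slice_to_natCast, htake, hne, pvRend]
        rw [hhead]
        -- continuation lines
        have hcont := pvCont pfx (g1 :: t) ((first :: rest).take g0.length)
          ((first :: rest).drop g0.length) (by simp)
          (by intro x hx; exact hall0 x (by simp [hx]))
          (by rw [List.map_drop, hflat1, List.drop_left])
        have hpre' : ((first :: rest).take g0.length).length = g0.length := by
          simp only [List.length_take, List.length_cons]
          omega
        have hitems : ((first :: rest).take g0.length) ++ ((first :: rest).drop g0.length)
            = first :: rest := by simp
        rw [hpre', hitems] at hcont
        rw [pvEnum_map pfx (first :: rest) _ _ (by omega), hcont]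
        -- assemble: join '\n' (tagged) = join ',\n' (headed)
        rw [← pvTag_cons_cons (pfx ++ pvRend g0) _ (by simp),
          pvTag_join _ (by simp)]
        simp [hpad]

-- ===== VERDICT (by name: the statement is the Claim_ definition above) =====
theorem wrap_items_py_spec : Claim_equal_wrap_items_py := by
  intro label items width _
  unfold Spec_wrap_items_py
  rw [pvA_eq_group, pvGroup_eq_alt]
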